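-- pv_equiv track=rewrite | github.com/NareshNalla/practice | python/strings/remove_spaces.py | remove_spaces_basic
-- ===== SOURCE A (Python) =====
-- def remove_spaces_basic(input_str: str) -> str:
--     """
--     Removes all whitespace using a basic for-loop and a list.
--     This approach is more explicit and easier to understand for beginners.
--
--     Time Complexity: O(n) - The code iterates through the string once.
--     Space Complexity: O(n) - In the worst case, a new list is created holding all n characters.
--     """
--     if not input_str:
--         return ""
--
--     # 1. Declare: Create an empty list to hold the non-space characters.
--     chars_list = []
--
--     # 2. Iterate: Loop through each character in the input string.
--     for char in input_str:
--         # 3. Validate: Check if the character is not a whitespace.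
--         if not char.isspace():
--             # 4. Assign/Accumulate: Add the valid character to our list.
--             chars_list.append(char)
--
--     # 5. Join the list of characters back into a final string.
--     return "".join(chars_list)
-- ===== SOURCE B (Python) =====
-- def remove_spaces_basic(input_str: str) -> str:
--     return "".join(input_str.split())
-- ===== Notes on version B (the rewrite author's own statement) =====
-- stated objective: idiomatic
-- what changed: Replaces the per-character isspace test with list accumulation and final join by a tokenize-then-concatenate one-liner: split the string on whitespace runs and join the tokens with the empty separator.
import Mathlib
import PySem

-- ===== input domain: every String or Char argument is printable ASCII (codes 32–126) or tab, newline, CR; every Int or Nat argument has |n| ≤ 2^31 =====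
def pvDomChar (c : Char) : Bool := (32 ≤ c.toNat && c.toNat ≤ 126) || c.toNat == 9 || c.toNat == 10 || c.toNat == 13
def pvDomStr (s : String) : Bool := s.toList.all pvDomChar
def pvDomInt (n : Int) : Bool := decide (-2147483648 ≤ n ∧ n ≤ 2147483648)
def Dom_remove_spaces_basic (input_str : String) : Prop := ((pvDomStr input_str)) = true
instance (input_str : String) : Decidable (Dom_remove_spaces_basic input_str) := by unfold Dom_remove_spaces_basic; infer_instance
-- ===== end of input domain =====

-- B removes all whitespace via ''.join(s.split()) instead of A's per-character loop; objective: idiomatic.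

-- ===== PORT A =====
-- Literal transliteration: early return on empty string, then a fold accumulating
-- the non-whitespace characters (Python's 1-char strings are Lean Chars), then
-- "".join of those singleton strings.
def remove_spaces_basic (input_str : String) : String :=
  if input_str = "" then "" else
    let chars_list : List Char :=
      input_str.toList.foldl (fun acc c => if !(PySem.Chars.isspace c) then acc ++ [c] else acc) []
    String.ofList (PySem.Chars.join [] (chars_list.map (fun c => [c])))

-- ===== PORT B =====
def remove_spaces_basic_alt (input_str : String) : String :=
  PySem.Str.join "" (PySem.Str.split₀ input_str)

-- ===== PRECONDITION & SPEC =====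
def Spec_remove_spaces_basic (input_str : String) (out : String) : Prop := out = remove_spaces_basic_alt input_str
instance (input_str : String) (out : String) : Decidable (Spec_remove_spaces_basic input_str out) := by unfold Spec_remove_spaces_basic; infer_instance

-- ===== CLAIM (what is proved, stated in full; the proofs are below) =====
def Claim_equal_remove_spaces_basic : Prop := ∀ (input_str : String), Dom_remove_spaces_basic input_str → Spec_remove_spaces_basic input_str (remove_spaces_basic input_str)

-- ===== LEMMAS AND PROOFS =====

-- split₀.go's flattened output is the filtered remainder appended to the state.
theorem split_go_flatten (rest : List Char) (cur : List Char) (acc : List (List Char)) :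
    (PySem.Chars.split₀.go rest cur acc).flatten
      = acc.reverse.flatten ++ cur.reverse ++ rest.filter (fun c => !PySem.Chars.isspace c) := by
  induction rest generalizing cur acc with
  | nil =>
    simp only [PySem.Chars.split₀.go, List.filter_nil, List.append_nil]
    split
    · simp_all [List.isEmpty_iff]
    · simp
  | cons c rest ih =>
    simp only [PySem.Chars.split₀.go]
    by_cases h : PySem.Chars.isspace c
    · by_cases hcur : cur.isEmpty
      · simp_all [List.isEmpty_iff]
      · simp_all
    · simp_all

theorem split₀_flatten (s : List Char) :
    (PySem.Chars.split₀ s).flatten = s.filter (fun c => !PySem.Chars.isspace c) := by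
  simpa using split_go_flatten s [] []

theorem intercalate_nil_eq_flatten (xs : List (List Char)) :
    ([] : List Char).intercalate xs = xs.flatten := by
  induction xs with
  | nil => simp [List.intercalate]
  | cons x xs ih =>
    cases xs with
    | nil => simp [List.intercalate]
    | cons y ys =>
      simp only [List.intercalate] at ih ⊢
      simp_all

theorem foldl_append_filter (s : List Char) (acc : List Char) :
    s.foldl (fun acc c => if !(PySem.Chars.isspace c) then acc ++ [c] else acc) acc
      = acc ++ s.filter (fun c => !PySem.Chars.isspace c) := by
  induction s generalizing acc with
  | nil => simp
  | cons c rest ih =>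
    simp only [List.foldl_cons, List.filter_cons]
    by_cases h : PySem.Chars.isspace c <;> simp_all

theorem alt_toList (s : String) :
    (remove_spaces_basic_alt s).toList = s.toList.filter (fun c => !PySem.Chars.isspace c) := by
  rw [remove_spaces_basic_alt, PySem.Str.toList_join, PySem.Str.split₀_map_toList]
  show ([] : List Char).intercalate _ = _
  rw [intercalate_nil_eq_flatten, split₀_flatten]

-- ===== VERDICT (by name: the statement is the Claim_ definition above) =====
theorem remove_spaces_basic_spec : Claim_equal_remove_spaces_basic := by
  intro s _
  show remove_spaces_basic s = remove_spaces_basic_alt s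
  apply String.toList_inj.mp
  rw [alt_toList, remove_spaces_basic]
  split
  · subst ‹s = ""›; simp
  · show (String.ofList (PySem.Chars.join [] (List.map (fun c => [c])
        (List.foldl (fun acc c => if (!PySem.Chars.isspace c) = true then acc ++ [c] else acc) [] s.toList)))).toList = _
    rw [PySem.Chars.join_nil_singletons, foldl_append_filter]
    simp
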